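-- pv_equiv track=rewrite | github.com/sunnweiwei/SimpleServer | run.py | _remove_binary_diffs
-- ===== SOURCE A (Python) =====
-- def _remove_binary_diffs(patch_text: str) -> str:
--     lines, cleaned, block, binary = patch_text.splitlines(), [], [], False
--     for ln in lines:
--         if ln.startswith('diff --git '):
--             if block and not binary:
--                 cleaned.extend(block)
--             block, binary = [ln], False
--         elif ln.startswith('GIT binary patch') or 'Binary files' in ln: # Added GIT binary patch case
--             binary = True
--             block.append(ln) # Keep the diff line for context if needed later
--             # Skip subsequent binary diff lines until next file
--         elif binary and (ln.startswith('literal ') or ln.startswith('delta ')):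
--              continue # Skip git binary patch data lines
--         else:
--             block.append(ln)
--     if block and not binary:
--         cleaned.extend(block)
--     return '\n'.join(cleaned)
-- ===== SOURCE B (Python) =====
-- def _remove_binary_diffs(patch_text: str) -> str:
--     # Group lines into blocks (preamble + one block per 'diff --git ' header),
--     # then drop every block containing a binary marker and flatten.
--     blocks = [[]]
--     for ln in patch_text.splitlines():
--         if ln.startswith('diff --git '):
--             blocks.append([ln])
--         else:
--             blocks[-1].append(ln)
--
--     def is_binary(block):
--         return any(ln.startswith('GIT binary patch') or 'Binary files' in ln
--                    for ln in block if not ln.startswith('diff --git '))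
--
--     return '\n'.join(ln for b in blocks if not is_binary(b) for ln in b)
-- ===== Notes on version B (the rewrite author's own statement) =====
-- stated objective: alternative
-- what changed: Replaces A's single-pass accumulator with interleaved cleaned/block/binary state by a group-then-filter pipeline: partition the lines into blocks at each git diff header line, drop every block containing a binary marker in a non-header line, then flatten and join.
import Mathlib
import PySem

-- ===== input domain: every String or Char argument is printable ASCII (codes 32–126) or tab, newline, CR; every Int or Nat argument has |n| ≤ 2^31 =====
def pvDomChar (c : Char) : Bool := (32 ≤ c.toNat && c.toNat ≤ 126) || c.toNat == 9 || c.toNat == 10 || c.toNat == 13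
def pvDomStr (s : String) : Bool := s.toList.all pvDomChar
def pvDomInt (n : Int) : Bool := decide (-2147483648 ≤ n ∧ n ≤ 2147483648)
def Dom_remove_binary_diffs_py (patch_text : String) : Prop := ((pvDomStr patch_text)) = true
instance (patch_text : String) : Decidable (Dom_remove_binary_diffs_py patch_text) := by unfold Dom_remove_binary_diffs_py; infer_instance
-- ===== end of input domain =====

-- B replaces A's interleaved single-pass accumulator with a group-into-blocks,
-- filter-out-binary-blocks, flatten pipeline (different decomposition, same cost).


-- ===== PORT A =====
-- loop state: (cleaned, block, binary)
def pvStepA (st : List String × List String × Bool) (ln : String) :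
    List String × List String × Bool :=
  if PySem.Str.startswith ln "diff --git " then
    ((if st.2.1 ≠ [] ∧ st.2.2 = false then st.1 ++ st.2.1 else st.1), [ln], false)
  else if PySem.Str.startswith ln "GIT binary patch" || PySem.Str.isIn "Binary files" ln then
    (st.1, st.2.1 ++ [ln], true)
  else if st.2.2 && (PySem.Str.startswith ln "literal " || PySem.Str.startswith ln "delta ") then
    st
  else
    (st.1, st.2.1 ++ [ln], st.2.2)

def remove_binary_diffs_py (patch_text : String) : String :=
  let st := (PySem.Str.splitlines patch_text).foldl pvStepA ([], [], false)
  let cleaned := if st.2.1 ≠ [] ∧ st.2.2 = false then st.1 ++ st.2.1 else st.1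
  PySem.Str.join "\n" cleaned

-- ===== PORT B =====
def pvIsStart (ln : String) : Bool := PySem.Str.startswith ln "diff --git "

def pvMarker (ln : String) : Bool :=
  PySem.Str.startswith ln "GIT binary patch" || PySem.Str.isIn "Binary files" ln

def pvIsBinary (b : List String) : Bool := b.any (fun ln => !pvIsStart ln && pvMarker ln)

-- grouping state: (finished blocks, current block)
def pvStepB (st : List (List String) × List String) (ln : String) :
    List (List String) × List String :=
  if pvIsStart ln then (st.1 ++ [st.2], [ln]) else (st.1, st.2 ++ [ln])

def remove_binary_diffs_py_alt (patch_text : String) : String :=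
  let gs := (PySem.Str.splitlines patch_text).foldl pvStepB ([], [])
  let blocks := gs.1 ++ [gs.2]
  PySem.Str.join "\n" ((blocks.filter (fun b => !pvIsBinary b)).flatten)

-- ===== PRECONDITION & SPEC =====
def Spec_remove_binary_diffs_py (patch_text : String) (out : String) : Prop := out = remove_binary_diffs_py_alt patch_text
instance (patch_text : String) (out : String) : Decidable (Spec_remove_binary_diffs_py patch_text out) := by unfold Spec_remove_binary_diffs_py; infer_instance

-- ===== CLAIM (what is proved, stated in full; the proofs are below) =====
def Claim_equal_remove_binary_diffs_py : Prop := ∀ (patch_text : String), Dom_remove_binary_diffs_py patch_text → Spec_remove_binary_diffs_py patch_text (remove_binary_diffs_py patch_text)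

-- ===== LEMMAS AND PROOFS =====

-- Invariant relating A's loop state to B's grouping state.
def pvRel (a : List String × List String × Bool) (b : List (List String) × List String) : Prop :=
  a.1 = (b.1.filter (fun blk => !pvIsBinary blk)).flatten ∧
  a.2.2 = pvIsBinary b.2 ∧
  (a.2.2 = false → a.2.1 = b.2)

lemma pvIsBinary_append (b : List String) (ln : String) :
    pvIsBinary (b ++ [ln]) = (pvIsBinary b || (!pvIsStart ln && pvMarker ln)) := by
  simp [pvIsBinary]

lemma pvIsBinary_singleton (ln : String) :
    pvIsBinary [ln] = (!pvIsStart ln && pvMarker ln) := by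
  simp [pvIsBinary]

lemma pvRel_step (a : List String × List String × Bool) (b : List (List String) × List String)
    (ln : String) (h : pvRel a b) : pvRel (pvStepA a ln) (pvStepB b ln) := by
  obtain ⟨a1, a2, a3⟩ := a
  obtain ⟨b1, b2⟩ := b
  obtain ⟨h1, h2, h3⟩ := h
  dsimp only at h1 h2 h3
  subst h1
  unfold pvStepA pvStepB
  cases hs : pvIsStart ln with
  | true =>
    have hs' : PySem.Str.startswith ln "diff --git " = true := hs
    rw [if_pos hs', if_pos rfl]
    refine ⟨?_, ?_, fun _ => rfl⟩
    · dsimp only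
      rw [List.filter_append, List.flatten_append]
      cases hb : pvIsBinary b2 with
      | true =>
        have ha3 : a3 = true := by rw [h2, hb]
        simp [ha3, hb]
      | false =>
        have ha3 : a3 = false := by rw [h2, hb]
        have hblk := h3 ha3
        subst hblk
        by_cases he : a2 = [] <;> simp [ha3, hb, he]
    · dsimp only
      rw [pvIsBinary_singleton, hs]
      simp
  | false =>
    have hs' : PySem.Str.startswith ln "diff --git " = false := hs
    rw [if_neg (show ¬ (false = true) by simp), if_neg (by rw [hs']; simp)]
    cases hm : pvMarker ln with
    | true =>
      have hm' : (PySem.Str.startswith ln "GIT binary patch" || PySem.Str.isIn "Binary files" ln) = true := hm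
      rw [if_pos hm']
      refine ⟨rfl, ?_, by simp⟩
      dsimp only
      rw [pvIsBinary_append, hs, hm]
      simp
    | false =>
      have hm' : (PySem.Str.startswith ln "GIT binary patch" || PySem.Str.isIn "Binary files" ln) = false := hm
      rw [if_neg (by rw [hm']; simp)]
      have hbin : pvIsBinary (b2 ++ [ln]) = a3 := by
        rw [pvIsBinary_append, hs, hm, ← h2]
        cases a3 <;> simp
      cases a3 with
      | true =>
        cases hld : (PySem.Str.startswith ln "literal " || PySem.Str.startswith ln "delta ") with
        | true =>
          rw [if_pos (by rw [Bool.true_and])]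
          exact ⟨rfl, by rw [hbin], by simp⟩
        | false =>
          rw [if_neg (by simp)]
          exact ⟨rfl, by rw [hbin], by simp⟩
      | false =>
        rw [if_neg (by rw [Bool.false_and]; simp)]
        exact ⟨rfl, by rw [hbin], fun _ => by rw [h3 rfl]⟩

lemma pvRel_foldl (lines : List String) (a : List String × List String × Bool)
    (b : List (List String) × List String) (h : pvRel a b) :
    pvRel (lines.foldl pvStepA a) (lines.foldl pvStepB b) := by
  induction lines generalizing a b with
  | nil => exact h
  | cons ln rest ih => exact ih _ _ (pvRel_step a b ln h)

-- ===== VERDICT (by name: the statement is the Claim_ definition above) =====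
theorem remove_binary_diffs_py_spec : Claim_equal_remove_binary_diffs_py := by
  intro patch_text _
  unfold Spec_remove_binary_diffs_py remove_binary_diffs_py remove_binary_diffs_py_alt
  have h := pvRel_foldl (PySem.Str.splitlines patch_text) ([], [], false) ([], [])
    (by refine ⟨rfl, ?_, fun _ => rfl⟩; simp [pvIsBinary])
  set sa := (PySem.Str.splitlines patch_text).foldl pvStepA ([], [], false) with hsa
  set sb := (PySem.Str.splitlines patch_text).foldl pvStepB ([], []) with hsb
  obtain ⟨h1, h2, h3⟩ := h
  dsimp only
  congr 1
  rw [List.filter_append, List.flatten_append, ← h1]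
  cases hb : pvIsBinary sb.2 with
  | true =>
    have ha : sa.2.2 = true := by rw [h2, hb]
    simp [ha, hb]
  | false =>
    have ha : sa.2.2 = false := by rw [h2, hb]
    have hblk := h3 ha
    by_cases he : sa.2.1 = [] <;> (simp [ha, hb, he, hblk]; try rw [← hblk, he])
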